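-- pv_equiv track=rewrite | github.com/Trinity-SYT-SECURITY/CogniSploit | tools/wordlist_manager.py | _categorize_wordlist
-- ===== SOURCE A (Python) =====
-- def _categorize_wordlist(filename: str) -> str:
--     """Categorize wordlist based on filename."""
--     filename_lower = filename.lower()
--
--     if any(word in filename_lower for word in ["sql", "injection", "sqli"]):
--         return "sql_injection"
--     elif any(word in filename_lower for word in ["xss", "script", "javascript"]):
--         return "xss"
--     elif any(word in filename_lower for word in ["password", "pass", "pwd"]):
--         return "authentication"
--     elif any(word in filename_lower for word in ["subdomain", "sub"]):
--         return "subdomain"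
--     elif any(word in filename_lower for word in ["directory", "dir", "fuzz"]):
--         return "directory"
--     elif any(word in filename_lower for word in ["username", "user", "login"]):
--         return "authentication"
--     elif any(word in filename_lower for word in ["lfi", "rfi", "file"]):
--         return "file_inclusion"
--     elif any(word in filename_lower for word in ["command", "cmd", "exec"]):
--         return "command_injection"
--     elif any(word in filename_lower for word in ["no-sql", "nosql", "mongo"]):
--         return "nosql_injection"
--     elif any(word in filename_lower for word in ["oracle", "mssql", "mysql", "postgres"]):
--         return "database_specific"
--     else:
--         return "generic"
-- ===== SOURCE B (Python) =====
-- # Categorize by scanning the filename's substrings against a keyword->priority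
-- # hash index (first/highest-priority rule = smallest index), instead of testing
-- # each rule's keywords against the filename in a branch cascade.
--
-- _CATS = ["sql_injection", "xss", "authentication", "subdomain", "directory",
--          "authentication", "file_inclusion", "command_injection",
--          "nosql_injection", "database_specific"]
--
-- _KW = {
--     "sql": 0, "injection": 0, "sqli": 0,
--     "xss": 1, "script": 1, "javascript": 1,
--     "password": 2, "pass": 2, "pwd": 2,
--     "subdomain": 3, "sub": 3,
--     "directory": 4, "dir": 4, "fuzz": 4,
--     "username": 5, "user": 5, "login": 5,
--     "lfi": 6, "rfi": 6, "file": 6,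
--     "command": 7, "cmd": 7, "exec": 7,
--     "no-sql": 8, "nosql": 8, "mongo": 8,
--     "oracle": 9, "mssql": 9, "mysql": 9, "postgres": 9,
-- }
--
-- _LENGTHS = [3, 4, 5, 6, 7, 8, 9, 10]  # the distinct keyword lengths
--
--
-- def _categorize_wordlist(filename: str) -> str:
--     """Categorize wordlist based on filename."""
--     f = filename.lower()
--     best = len(_CATS)
--     for i in range(len(f)):
--         for L in _LENGTHS:
--             p = _KW.get(f[i:i + L])
--             if p is not None and p < best:
--                 best = p
--     return _CATS[best] if best < len(_CATS) else "generic"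
-- ===== Notes on version B (the rewrite author's own statement) =====
-- stated objective: alternative
-- what changed: Instead of A's elif cascade that tests each rule's keywords for containment in the filename, B lowercases once and scans the filename's own substrings (every start position times the 8 distinct keyword lengths) against a keyword-to-priority hash index, keeping the minimum priority seen and mapping it to its category at the end.
import Mathlib
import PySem

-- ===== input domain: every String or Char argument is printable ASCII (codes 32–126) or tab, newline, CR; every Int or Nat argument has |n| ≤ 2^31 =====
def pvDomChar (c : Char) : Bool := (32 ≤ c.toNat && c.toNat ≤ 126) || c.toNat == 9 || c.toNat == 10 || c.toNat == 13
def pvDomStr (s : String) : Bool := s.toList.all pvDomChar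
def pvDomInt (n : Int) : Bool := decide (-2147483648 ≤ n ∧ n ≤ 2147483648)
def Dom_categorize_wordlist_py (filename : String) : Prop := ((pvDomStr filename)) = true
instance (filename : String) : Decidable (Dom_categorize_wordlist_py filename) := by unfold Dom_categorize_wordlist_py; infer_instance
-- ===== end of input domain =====

-- B replaces A's keyword-driven elif cascade by a substring scan of the filename against
-- a keyword→priority hash index, keeping the minimum priority (alternative algorithm, same result).

-- ===== PORT A =====
def categorize_wordlist_py (filename : String) : String :=
  let filename_lower := PySem.Str.lower filename
  if ["sql", "injection", "sqli"].any (fun word => PySem.Str.isIn word filename_lower) then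
    "sql_injection"
  else if ["xss", "script", "javascript"].any (fun word => PySem.Str.isIn word filename_lower) then
    "xss"
  else if ["password", "pass", "pwd"].any (fun word => PySem.Str.isIn word filename_lower) then
    "authentication"
  else if ["subdomain", "sub"].any (fun word => PySem.Str.isIn word filename_lower) then
    "subdomain"
  else if ["directory", "dir", "fuzz"].any (fun word => PySem.Str.isIn word filename_lower) then
    "directory"
  else if ["username", "user", "login"].any (fun word => PySem.Str.isIn word filename_lower) then
    "authentication"
  else if ["lfi", "rfi", "file"].any (fun word => PySem.Str.isIn word filename_lower) then
    "file_inclusion"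
  else if ["command", "cmd", "exec"].any (fun word => PySem.Str.isIn word filename_lower) then
    "command_injection"
  else if ["no-sql", "nosql", "mongo"].any (fun word => PySem.Str.isIn word filename_lower) then
    "nosql_injection"
  else if ["oracle", "mssql", "mysql", "postgres"].any (fun word => PySem.Str.isIn word filename_lower) then
    "database_specific"
  else
    "generic"

-- ===== PORT B =====
-- _CATS from Source B
def pvCats : List String :=
  ["sql_injection", "xss", "authentication", "subdomain", "directory",
   "authentication", "file_inclusion", "command_injection",
   "nosql_injection", "database_specific"]

-- _KW from Source B: keyword → priority (rule index)
def pvKwList : List (String × Int) :=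
  [ ("sql", 0), ("injection", 0), ("sqli", 0),
    ("xss", 1), ("script", 1), ("javascript", 1),
    ("password", 2), ("pass", 2), ("pwd", 2),
    ("subdomain", 3), ("sub", 3),
    ("directory", 4), ("dir", 4), ("fuzz", 4),
    ("username", 5), ("user", 5), ("login", 5),
    ("lfi", 6), ("rfi", 6), ("file", 6),
    ("command", 7), ("cmd", 7), ("exec", 7),
    ("no-sql", 8), ("nosql", 8), ("mongo", 8),
    ("oracle", 9), ("mssql", 9), ("mysql", 9), ("postgres", 9) ]

def pvKw : PySem.Dict String Int := PySem.Dict.mk pvKwList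

-- _LENGTHS from Source B
def pvLens : List Int := [3, 4, 5, 6, 7, 8, 9, 10]

-- the inner 'for L in _LENGTHS' loop body of Source B
def pvScanStep (f : String) (i : Int) (best : Int) (L : Int) : Int :=
  match PySem.Dict.get? pvKw (PySem.Str.slice f (some i) (some (i + L))) with
  | some p => if p < best then p else best
  | none => best

def categorize_wordlist_py_alt (filename : String) : String :=
  let f := PySem.Str.lower filename
  let best := (PySem.List.pyRange 0 (PySem.Str.len f) 1).foldl
      (fun best i => pvLens.foldl (pvScanStep f i) best) (pvCats.length : Int)
  if best < (pvCats.length : Int) then (PySem.List.pyGet? pvCats best).getD "generic"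
  else "generic"

-- ===== PRECONDITION & SPEC =====
def Spec_categorize_wordlist_py (filename : String) (out : String) : Prop := out = categorize_wordlist_py_alt filename
instance (filename : String) (out : String) : Decidable (Spec_categorize_wordlist_py filename out) := by unfold Spec_categorize_wordlist_py; infer_instance

-- ===== CLAIM (what is proved, stated in full; the proofs are below) =====
def Claim_equal_categorize_wordlist_py : Prop := ∀ (filename : String), Dom_categorize_wordlist_py filename → Spec_categorize_wordlist_py filename (categorize_wordlist_py filename)

-- ===== LEMMAS AND PROOFS =====

-- the index A's cascade selects on the lowered filename (10 = no rule matches)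
def pvFirstIdx (f : String) : Int :=
  if ["sql", "injection", "sqli"].any (fun word => PySem.Str.isIn word f) then 0
  else if ["xss", "script", "javascript"].any (fun word => PySem.Str.isIn word f) then 1
  else if ["password", "pass", "pwd"].any (fun word => PySem.Str.isIn word f) then 2
  else if ["subdomain", "sub"].any (fun word => PySem.Str.isIn word f) then 3
  else if ["directory", "dir", "fuzz"].any (fun word => PySem.Str.isIn word f) then 4
  else if ["username", "user", "login"].any (fun word => PySem.Str.isIn word f) then 5
  else if ["lfi", "rfi", "file"].any (fun word => PySem.Str.isIn word f) then 6
  else if ["command", "cmd", "exec"].any (fun word => PySem.Str.isIn word f) then 7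
  else if ["no-sql", "nosql", "mongo"].any (fun word => PySem.Str.isIn word f) then 8
  else if ["oracle", "mssql", "mysql", "postgres"].any (fun word => PySem.Str.isIn word f) then 9
  else 10

-- B's minimum over all (position, length) windows
def pvBest (f : String) : Int :=
  (PySem.List.pyRange 0 (PySem.Str.len f) 1).foldl
      (fun best i => pvLens.foldl (pvScanStep f i) best) 10

def pvPairs (f : String) : List (Int × Int) :=
  (PySem.List.pyRange 0 (PySem.Str.len f) 1).flatMap (fun i => pvLens.map (fun L => (i, L)))

def pvH (f : String) (x : Int × Int) : Option Int :=
  PySem.Dict.get? pvKw (PySem.Str.slice f (some x.1) (some (x.1 + x.2)))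

def pvStep (f : String) (best : Int) (x : Int × Int) : Int :=
  match pvH f x with
  | some p => if p < best then p else best
  | none => best

lemma pvKw_items : pvKw.items = pvKwList := rfl

lemma pvBest_eq_flat (f : String) :
    pvBest f = (pvPairs f).foldl (pvStep f) 10 := by
  unfold pvBest pvPairs
  rw [List.flatMap_def, List.foldl_flatten]
  simp only [List.foldl_map]
  rfl

lemma pvStep_le (f : String) (b : Int) (x : Int × Int) : pvStep f b x ≤ b := by
  unfold pvStep
  cases pvH f x with
  | none => exact le_refl b
  | some p => show (if p < b then p else b) ≤ b; split_ifs <;> omega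

lemma pvFold_le_init (f : String) (l : List (Int × Int)) (b : Int) :
    l.foldl (pvStep f) b ≤ b := by
  induction l generalizing b with
  | nil => exact le_refl b
  | cons x l ih => exact le_trans (ih _) (pvStep_le f b x)

lemma pvFold_le_of_hit (f : String) (l : List (Int × Int)) (b p : Int) (x : Int × Int)
    (hx : x ∈ l) (hp : pvH f x = some p) : l.foldl (pvStep f) b ≤ p := by
  induction l generalizing b with
  | nil => cases hx
  | cons y l ih =>
    rcases List.mem_cons.mp hx with rfl | hx'
    · refine le_trans (pvFold_le_init f l _) ?_
      unfold pvStep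
      rw [hp]
      show (if p < b then p else b) ≤ p
      split_ifs <;> omega
    · exact ih (pvStep f b y) hx'

lemma pvFold_cases (f : String) (l : List (Int × Int)) (b : Int) :
    l.foldl (pvStep f) b = b ∨ ∃ x ∈ l, pvH f x = some (l.foldl (pvStep f) b) := by
  induction l generalizing b with
  | nil => exact Or.inl rfl
  | cons y l ih =>
    rw [List.foldl_cons]
    rcases ih (pvStep f b y) with h | ⟨x, hx, hh⟩
    · rw [h]
      cases hhy : pvH f y with
      | none => left; unfold pvStep; rw [hhy]
      | some p =>
        by_cases hlt : p < b
        · right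
          exact ⟨y, List.mem_cons_self, by simp [pvStep, hhy, hlt]⟩
        · left; unfold pvStep; rw [hhy]; simp [hlt]
    · exact Or.inr ⟨x, List.mem_cons_of_mem _ hx, hh⟩

-- the 30 finite facts about the keyword table, checked by the kernel
lemma pvKw_facts : ∀ x ∈ pvKwList,
    ((x.1.toList.length : Int) ∈ pvLens ∧ 0 < x.1.toList.length ∧
      PySem.Dict.get? pvKw x.1 = some x.2) := by decide

-- a keyword of priority p occurring in f yields a window hit of value p
lemma pvHit_of_kw (f k : String) (p : Int) (hk : (k, p) ∈ pvKwList)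
    (hin : PySem.Str.isIn k f = true) : ∃ x ∈ pvPairs f, pvH f x = some p := by
  obtain ⟨hlen, hpos, hget⟩ := pvKw_facts (k, p) hk
  dsimp only at hlen hpos hget
  obtain ⟨l, r, hf⟩ := (PySem.Str.isIn_iff_infix k f).mp hin
  have hflen : f.toList.length = l.length + (k.toList.length + r.length) := by
    rw [← hf]; simp
  refine ⟨((l.length : Int), (k.toList.length : Int)), ?_, ?_⟩
  · unfold pvPairs
    rw [List.mem_flatMap]
    refine ⟨(l.length : Int), ?_, List.mem_map.mpr ⟨(k.toList.length : Int), hlen, rfl⟩⟩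
    rw [PySem.List.mem_pyRange_one, PySem.Str.len_eq]
    omega
  · show pvKw.get? (PySem.Str.slice f (some (l.length : Int))
        (some ((l.length : Int) + (k.toList.length : Int)))) = some p
    have hslice : PySem.Str.slice f (some (l.length : Int))
        (some ((l.length : Int) + (k.toList.length : Int))) = k := by
      apply String.toList_inj.mp
      rw [PySem.Str.toList_slice, PySem.Chars.slice_eq_listSlice,
        PySem.List.slice_natCast_add, ← hf]
      simp
    rw [hslice]
    exact hget

-- a window hit of value p comes from a keyword of priority p occurring in f
lemma pvKw_of_hit (f : String) (p : Int) (x : Int × Int) (hx : x ∈ pvPairs f)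
    (hp : pvH f x = some p) :
    ∃ k, (k, p) ∈ pvKwList ∧ PySem.Str.isIn k f = true := by
  refine ⟨PySem.Str.slice f (some x.1) (some (x.1 + x.2)), ?_, ?_⟩
  · rw [← pvKw_items]
    exact PySem.Dict.mem_items_of_get?_eq_some pvKw hp
  · have hi : 0 ≤ x.1 := by
      unfold pvPairs at hx
      rw [List.mem_flatMap] at hx
      obtain ⟨i, hi, hmem⟩ := hx
      obtain ⟨L, _, hLe⟩ := List.mem_map.mp hmem
      rw [PySem.List.mem_pyRange_one] at hi
      cases hLe
      omega
    rw [PySem.Str.isIn_iff_infix, PySem.Str.toList_slice, PySem.Chars.slice_eq_listSlice]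
    by_cases hL : 0 ≤ x.1 + x.2
    · rw [PySem.List.slice_toNat _ hi hL]
      exact ((List.take_prefix _ _).isInfix).trans (List.drop_suffix _ _).isInfix
    · unfold PySem.List.slice
      exact ((List.take_prefix _ _).isInfix).trans (List.drop_suffix _ _).isInfix

lemma pvFI0 (f : String) (h : (["sql", "injection", "sqli"].any (fun word => PySem.Str.isIn word f)) = true) :
    pvFirstIdx f ≤ 0 := by
  unfold pvFirstIdx
  split_ifs <;> omega

lemma pvFI1 (f : String) (h : (["xss", "script", "javascript"].any (fun word => PySem.Str.isIn word f)) = true) :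
    pvFirstIdx f ≤ 1 := by
  unfold pvFirstIdx
  split_ifs <;> omega

lemma pvFI2 (f : String) (h : (["password", "pass", "pwd"].any (fun word => PySem.Str.isIn word f)) = true) :
    pvFirstIdx f ≤ 2 := by
  unfold pvFirstIdx
  split_ifs <;> omega

lemma pvFI3 (f : String) (h : (["subdomain", "sub"].any (fun word => PySem.Str.isIn word f)) = true) :
    pvFirstIdx f ≤ 3 := by
  unfold pvFirstIdx
  split_ifs <;> omega

lemma pvFI4 (f : String) (h : (["directory", "dir", "fuzz"].any (fun word => PySem.Str.isIn word f)) = true) :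
    pvFirstIdx f ≤ 4 := by
  unfold pvFirstIdx
  split_ifs <;> omega

lemma pvFI5 (f : String) (h : (["username", "user", "login"].any (fun word => PySem.Str.isIn word f)) = true) :
    pvFirstIdx f ≤ 5 := by
  unfold pvFirstIdx
  split_ifs <;> omega

lemma pvFI6 (f : String) (h : (["lfi", "rfi", "file"].any (fun word => PySem.Str.isIn word f)) = true) :
    pvFirstIdx f ≤ 6 := by
  unfold pvFirstIdx
  split_ifs <;> omega

lemma pvFI7 (f : String) (h : (["command", "cmd", "exec"].any (fun word => PySem.Str.isIn word f)) = true) :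
    pvFirstIdx f ≤ 7 := by
  unfold pvFirstIdx
  split_ifs <;> omega

lemma pvFI8 (f : String) (h : (["no-sql", "nosql", "mongo"].any (fun word => PySem.Str.isIn word f)) = true) :
    pvFirstIdx f ≤ 8 := by
  unfold pvFirstIdx
  split_ifs <;> omega

lemma pvFI9 (f : String) (h : (["oracle", "mssql", "mysql", "postgres"].any (fun word => PySem.Str.isIn word f)) = true) :
    pvFirstIdx f ≤ 9 := by
  unfold pvFirstIdx
  split_ifs <;> omega

-- any keyword hit bounds A's cascade index from above
lemma pvFirstIdx_le (f k : String) (p : Int) (hk : (k, p) ∈ pvKwList)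
    (hin : PySem.Str.isIn k f = true) : pvFirstIdx f ≤ p := by
  unfold pvKwList at hk
  simp only [List.mem_cons, List.not_mem_nil, or_false, Prod.mk.injEq] at hk
  rcases hk with ⟨rfl, rfl⟩ | ⟨rfl, rfl⟩ | ⟨rfl, rfl⟩ | ⟨rfl, rfl⟩ | ⟨rfl, rfl⟩ |
    ⟨rfl, rfl⟩ | ⟨rfl, rfl⟩ | ⟨rfl, rfl⟩ | ⟨rfl, rfl⟩ | ⟨rfl, rfl⟩ | ⟨rfl, rfl⟩ |
    ⟨rfl, rfl⟩ | ⟨rfl, rfl⟩ | ⟨rfl, rfl⟩ | ⟨rfl, rfl⟩ | ⟨rfl, rfl⟩ | ⟨rfl, rfl⟩ |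
    ⟨rfl, rfl⟩ | ⟨rfl, rfl⟩ | ⟨rfl, rfl⟩ | ⟨rfl, rfl⟩ | ⟨rfl, rfl⟩ | ⟨rfl, rfl⟩ |
    ⟨rfl, rfl⟩ | ⟨rfl, rfl⟩ | ⟨rfl, rfl⟩ | ⟨rfl, rfl⟩ | ⟨rfl, rfl⟩ | ⟨rfl, rfl⟩ |
    ⟨rfl, rfl⟩
  exacts [pvFI0 f (by simp at hin ⊢; tauto),
    pvFI0 f (by simp at hin ⊢; tauto),
    pvFI0 f (by simp at hin ⊢; tauto),
    pvFI1 f (by simp at hin ⊢; tauto),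
    pvFI1 f (by simp at hin ⊢; tauto),
    pvFI1 f (by simp at hin ⊢; tauto),
    pvFI2 f (by simp at hin ⊢; tauto),
    pvFI2 f (by simp at hin ⊢; tauto),
    pvFI2 f (by simp at hin ⊢; tauto),
    pvFI3 f (by simp at hin ⊢; tauto),
    pvFI3 f (by simp at hin ⊢; tauto),
    pvFI4 f (by simp at hin ⊢; tauto),
    pvFI4 f (by simp at hin ⊢; tauto),
    pvFI4 f (by simp at hin ⊢; tauto),
    pvFI5 f (by simp at hin ⊢; tauto),
    pvFI5 f (by simp at hin ⊢; tauto),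
    pvFI5 f (by simp at hin ⊢; tauto),
    pvFI6 f (by simp at hin ⊢; tauto),
    pvFI6 f (by simp at hin ⊢; tauto),
    pvFI6 f (by simp at hin ⊢; tauto),
    pvFI7 f (by simp at hin ⊢; tauto),
    pvFI7 f (by simp at hin ⊢; tauto),
    pvFI7 f (by simp at hin ⊢; tauto),
    pvFI8 f (by simp at hin ⊢; tauto),
    pvFI8 f (by simp at hin ⊢; tauto),
    pvFI8 f (by simp at hin ⊢; tauto),
    pvFI9 f (by simp at hin ⊢; tauto),
    pvFI9 f (by simp at hin ⊢; tauto),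
    pvFI9 f (by simp at hin ⊢; tauto),
    pvFI9 f (by simp at hin ⊢; tauto)]

lemma pvFirstIdx_le_ten (f : String) : pvFirstIdx f ≤ 10 := by
  unfold pvFirstIdx; split_ifs <;> omega

-- when A's cascade fires, some keyword of that priority occurs in f
set_option maxHeartbeats 1600000 in
lemma pvKw_of_firstIdx (f : String) (h : pvFirstIdx f ≠ 10) :
    ∃ k, (k, pvFirstIdx f) ∈ pvKwList ∧ PySem.Str.isIn k f = true := by
  unfold pvFirstIdx at *
  split_ifs at * with h0 h1 h2 h3 h4 h5 h6 h7 h8 h9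
  · simp only [List.any_cons, List.any_nil, Bool.or_false, Bool.or_eq_true] at h0
    rcases h0 with h | h | h
    exacts [⟨"sql", by decide, h⟩, ⟨"injection", by decide, h⟩, ⟨"sqli", by decide, h⟩]
  · simp only [List.any_cons, List.any_nil, Bool.or_false, Bool.or_eq_true] at h1
    rcases h1 with h | h | h
    exacts [⟨"xss", by decide, h⟩, ⟨"script", by decide, h⟩, ⟨"javascript", by decide, h⟩]
  · simp only [List.any_cons, List.any_nil, Bool.or_false, Bool.or_eq_true] at h2
    rcases h2 with h | h | h
    exacts [⟨"password", by decide, h⟩, ⟨"pass", by decide, h⟩, ⟨"pwd", by decide, h⟩]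
  · simp only [List.any_cons, List.any_nil, Bool.or_false, Bool.or_eq_true] at h3
    rcases h3 with h | h
    exacts [⟨"subdomain", by decide, h⟩, ⟨"sub", by decide, h⟩]
  · simp only [List.any_cons, List.any_nil, Bool.or_false, Bool.or_eq_true] at h4
    rcases h4 with h | h | h
    exacts [⟨"directory", by decide, h⟩, ⟨"dir", by decide, h⟩, ⟨"fuzz", by decide, h⟩]
  · simp only [List.any_cons, List.any_nil, Bool.or_false, Bool.or_eq_true] at h5
    rcases h5 with h | h | h
    exacts [⟨"username", by decide, h⟩, ⟨"user", by decide, h⟩, ⟨"login", by decide, h⟩]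
  · simp only [List.any_cons, List.any_nil, Bool.or_false, Bool.or_eq_true] at h6
    rcases h6 with h | h | h
    exacts [⟨"lfi", by decide, h⟩, ⟨"rfi", by decide, h⟩, ⟨"file", by decide, h⟩]
  · simp only [List.any_cons, List.any_nil, Bool.or_false, Bool.or_eq_true] at h7
    rcases h7 with h | h | h
    exacts [⟨"command", by decide, h⟩, ⟨"cmd", by decide, h⟩, ⟨"exec", by decide, h⟩]
  · simp only [List.any_cons, List.any_nil, Bool.or_false, Bool.or_eq_true] at h8
    rcases h8 with h | h | h
    exacts [⟨"no-sql", by decide, h⟩, ⟨"nosql", by decide, h⟩, ⟨"mongo", by decide, h⟩]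
  · simp only [List.any_cons, List.any_nil, Bool.or_false, Bool.or_eq_true] at h9
    rcases h9 with h | h | h | h
    exacts [⟨"oracle", by decide, h⟩, ⟨"mssql", by decide, h⟩, ⟨"mysql", by decide, h⟩,
      ⟨"postgres", by decide, h⟩]
  · exact absurd rfl h

lemma pvBest_eq_firstIdx (f : String) : pvBest f = pvFirstIdx f := by
  rw [pvBest_eq_flat]
  apply le_antisymm
  · by_cases h : pvFirstIdx f = 10
    · rw [h]; exact pvFold_le_init f _ 10
    · obtain ⟨k, hk, hin⟩ := pvKw_of_firstIdx f h
      obtain ⟨x, hx, hh⟩ := pvHit_of_kw f k _ hk hin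
      exact pvFold_le_of_hit f _ 10 _ x hx hh
  · rcases pvFold_cases f (pvPairs f) 10 with h | ⟨x, hx, hh⟩
    · rw [h]; exact pvFirstIdx_le_ten f
    · obtain ⟨k, hk, hin⟩ := pvKw_of_hit f _ x hx hh
      exact pvFirstIdx_le f k _ hk hin

-- A's return value as a category-table lookup of an index
def pvCatOf (q : Int) : String :=
  if q < (pvCats.length : Int) then (PySem.List.pyGet? pvCats q).getD "generic"
  else "generic"

set_option maxHeartbeats 3200000 in
lemma pvA_eq (filename : String) :
    categorize_wordlist_py filename = pvCatOf (pvFirstIdx (PySem.Str.lower filename)) := by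
  show
      (if (["sql", "injection", "sqli"].any (fun word => PySem.Str.isIn word (PySem.Str.lower filename))) = true then "sql_injection"
      else
      (if (["xss", "script", "javascript"].any (fun word => PySem.Str.isIn word (PySem.Str.lower filename))) = true then "xss"
      else
      (if (["password", "pass", "pwd"].any (fun word => PySem.Str.isIn word (PySem.Str.lower filename))) = true then "authentication"
      else
      (if (["subdomain", "sub"].any (fun word => PySem.Str.isIn word (PySem.Str.lower filename))) = true then "subdomain"
      else
      (if (["directory", "dir", "fuzz"].any (fun word => PySem.Str.isIn word (PySem.Str.lower filename))) = true then "directory"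
      else
      (if (["username", "user", "login"].any (fun word => PySem.Str.isIn word (PySem.Str.lower filename))) = true then "authentication"
      else
      (if (["lfi", "rfi", "file"].any (fun word => PySem.Str.isIn word (PySem.Str.lower filename))) = true then "file_inclusion"
      else
      (if (["command", "cmd", "exec"].any (fun word => PySem.Str.isIn word (PySem.Str.lower filename))) = true then "command_injection"
      else
      (if (["no-sql", "nosql", "mongo"].any (fun word => PySem.Str.isIn word (PySem.Str.lower filename))) = true then "nosql_injection"
      else
      (if (["oracle", "mssql", "mysql", "postgres"].any (fun word => PySem.Str.isIn word (PySem.Str.lower filename))) = true then "database_specific"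
      else
      "generic"))))))))))
    = pvCatOf (pvFirstIdx (PySem.Str.lower filename))
  unfold pvFirstIdx
  by_cases h0 : (["sql", "injection", "sqli"].any (fun word => PySem.Str.isIn word (PySem.Str.lower filename))) = true
  · simp only [if_pos h0]; rfl
  · simp only [if_neg h0]
    by_cases h1 : (["xss", "script", "javascript"].any (fun word => PySem.Str.isIn word (PySem.Str.lower filename))) = true
    · simp only [if_pos h1]; rfl
    · simp only [if_neg h1]
      by_cases h2 : (["password", "pass", "pwd"].any (fun word => PySem.Str.isIn word (PySem.Str.lower filename))) = true
      · simp only [if_pos h2]; rfl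
      · simp only [if_neg h2]
        by_cases h3 : (["subdomain", "sub"].any (fun word => PySem.Str.isIn word (PySem.Str.lower filename))) = true
        · simp only [if_pos h3]; rfl
        · simp only [if_neg h3]
          by_cases h4 : (["directory", "dir", "fuzz"].any (fun word => PySem.Str.isIn word (PySem.Str.lower filename))) = true
          · simp only [if_pos h4]; rfl
          · simp only [if_neg h4]
            by_cases h5 : (["username", "user", "login"].any (fun word => PySem.Str.isIn word (PySem.Str.lower filename))) = true
            · simp only [if_pos h5]; rfl
            · simp only [if_neg h5]
              by_cases h6 : (["lfi", "rfi", "file"].any (fun word => PySem.Str.isIn word (PySem.Str.lower filename))) = true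
              · simp only [if_pos h6]; rfl
              · simp only [if_neg h6]
                by_cases h7 : (["command", "cmd", "exec"].any (fun word => PySem.Str.isIn word (PySem.Str.lower filename))) = true
                · simp only [if_pos h7]; rfl
                · simp only [if_neg h7]
                  by_cases h8 : (["no-sql", "nosql", "mongo"].any (fun word => PySem.Str.isIn word (PySem.Str.lower filename))) = true
                  · simp only [if_pos h8]; rfl
                  · simp only [if_neg h8]
                    by_cases h9 : (["oracle", "mssql", "mysql", "postgres"].any (fun word => PySem.Str.isIn word (PySem.Str.lower filename))) = true
                    · simp only [if_pos h9]; rfl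
                    · simp only [if_neg h9]
                      rfl

set_option maxHeartbeats 3200000 in
lemma pvB_eq (filename : String) :
    categorize_wordlist_py_alt filename = pvCatOf (pvBest (PySem.Str.lower filename)) := by
  have h10 : (pvCats.length : Int) = 10 := by norm_num [pvCats]
  show
    (if ((PySem.List.pyRange 0 (PySem.Str.len (PySem.Str.lower filename)) 1).foldl
        (fun best i => pvLens.foldl (pvScanStep (PySem.Str.lower filename) i) best)
        (pvCats.length : Int)) < (pvCats.length : Int) then
      (PySem.List.pyGet? pvCats
        ((PySem.List.pyRange 0 (PySem.Str.len (PySem.Str.lower filename)) 1).foldl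
          (fun best i => pvLens.foldl (pvScanStep (PySem.Str.lower filename) i) best)
          (pvCats.length : Int))).getD "generic"
    else "generic")
    = pvCatOf (pvBest (PySem.Str.lower filename))
  unfold pvCatOf pvBest
  rw [h10]

-- ===== VERDICT (by name: the statement is the Claim_ definition above) =====
theorem categorize_wordlist_py_spec : Claim_equal_categorize_wordlist_py := by
  intro filename _
  show categorize_wordlist_py filename = categorize_wordlist_py_alt filename
  rw [pvA_eq, pvB_eq, pvBest_eq_firstIdx]
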